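-- pv_equiv track=rewrite | github.com/mjclarke01/EPIJudge | epi_judge_python/closest_int_same_weight.py | find_first_change
-- ===== SOURCE A (Python) =====
-- def find_first_change(x):
--     count = 0
--
--     while x:
--         if x & 1 != (x >> 1) & 1:
--             return count
--         x >>= 1
--         count += 1
--     raise Exception("Oops!")
-- ===== SOURCE B (Python) =====
-- # Closed-form bit trick instead of a bit-by-bit scan: v = x ^ (x >> 1) marks every
-- # position where adjacent bits differ; the answer is the index of v's lowest set bit.
-- def find_first_change(x):
--     v = x ^ (x >> 1)
--     if v == 0:
--         raise Exception("Oops!")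
--     return (v ^ (v - 1)).bit_length() - 1
-- ===== Notes on version B (the rewrite author's own statement) =====
-- stated objective: alternative
-- what changed: Replaces the bit-by-bit while loop with a single closed-form bit computation: v = x ^ (x >> 1) marks every adjacent-bit change and (v ^ (v-1)).bit_length() - 1 is the index of its lowest set bit.
import Mathlib
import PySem

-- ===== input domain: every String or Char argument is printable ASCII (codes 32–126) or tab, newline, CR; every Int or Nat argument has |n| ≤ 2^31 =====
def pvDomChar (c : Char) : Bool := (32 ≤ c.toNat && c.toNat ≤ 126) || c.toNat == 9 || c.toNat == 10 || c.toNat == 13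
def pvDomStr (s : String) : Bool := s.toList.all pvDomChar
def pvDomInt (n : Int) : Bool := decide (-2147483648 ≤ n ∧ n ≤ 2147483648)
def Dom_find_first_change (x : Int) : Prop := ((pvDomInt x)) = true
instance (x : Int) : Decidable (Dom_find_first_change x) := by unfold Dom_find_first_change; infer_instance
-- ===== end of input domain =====

-- B replaces A's bit-by-bit scan loop with one closed-form bit computation
-- (x ^ (x >> 1), then lowest-set-bit index via bit_length).


-- ===== PORT A =====
-- Python's 'while x' tests x ≠ 0; at x = -1 that loop repeats forever (-1 >> 1 == -1
-- and both tested bits are 1), so the totality guard adds 'x ≠ -1' — at x = -1 the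
-- Python never returns, that input is outside Pre_find_first_change and the value
-- returned there is irrelevant.  '&' is PySem.Int.band, '>> 1' is core '>>> 1'.
def findLoopA (x : Int) (count : Int) : Int :=
  if h : x ≠ 0 ∧ x ≠ -1 then
    if PySem.Int.band x 1 ≠ PySem.Int.band (x >>> (1 : Nat)) 1 then count
    else findLoopA (x >>> (1 : Nat)) (count + 1)
  else count
termination_by x.natAbs
decreasing_by
  cases x with
  | ofNat n =>
      have hn : n ≠ 0 := fun h0 => h.1 (by simp [h0])
      have he : ((Int.ofNat n) >>> (1 : Nat)) = Int.ofNat (n >>> 1) := rfl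
      rw [he]; simp [Nat.shiftRight_one]; omega
  | negSucc m =>
      have hm : m ≠ 0 := fun h0 => h.2 (by subst h0; decide)
      have he : ((Int.negSucc m) >>> (1 : Nat)) = Int.negSucc (m >>> 1) := rfl
      rw [he]; simp only [Int.natAbs, Nat.shiftRight_one]; omega

def find_first_change (x : Int) : Int := findLoopA x 0

-- ===== PORT B =====
-- Literal port of Source B; 'raise Exception("Oops!")' (v = 0, i.e. x = 0 or x = -1) is
-- outside Pre_find_first_change, the branch returns a dummy 0.  '.bit_length()' is
-- PySem.Int.bitLength (Python-exact).
def find_first_change_alt (x : Int) : Int :=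
  let v := PySem.Int.bxor x (x >>> (1 : Nat))
  if v = 0 then 0
  else (PySem.Int.bitLength (PySem.Int.bxor v (v - 1)) : Int) - 1

-- ===== PRECONDITION & SPEC =====
-- Pre_ excludes only inputs on which A never returns: x = 0 (A raises Exception,
-- B raises too) and x = -1 (A's while loop never terminates; B raises).
def Pre_find_first_change (x : Int) : Prop := x ≠ 0 ∧ x ≠ -1
instance (x : Int) : Decidable (Pre_find_first_change x) := by unfold Pre_find_first_change; infer_instance
def pvWitness_find_first_change : Int := 6

def Spec_find_first_change (x : Int) (out : Int) : Prop := out = find_first_change_alt x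
instance (x : Int) (out : Int) : Decidable (Spec_find_first_change x out) := by unfold Spec_find_first_change; infer_instance

-- ===== CLAIM (what is proved, stated in full; the proofs are below) =====
def Claim_equal_find_first_change : Prop := ∀ (x : Int), Dom_find_first_change x → Pre_find_first_change x → Spec_find_first_change x (find_first_change x)

-- ===== LEMMAS AND PROOFS =====

-- trailing-zero count (proof-side definition; 0 for w = 0)
def pvTz (w : Nat) : Nat :=
  if w = 0 then 0
  else if w % 2 = 1 then 0
  else pvTz (w / 2) + 1
termination_by w
decreasing_by omega

-- A's loop on the magnitude level: both the positive and the negative run of the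
-- Python loop compare bit i with bit i+1 of this Nat and halve it
def pvLoopN (n : Nat) (c : Int) : Int :=
  if n = 0 then c
  else if n % 2 = n / 2 % 2 then pvLoopN (n / 2) (c + 1)
  else c
termination_by n
decreasing_by omega

lemma pv_xor_mod_two (a b : Nat) : (a ^^^ b) % 2 = a % 2 ^^^ b % 2 := by
  have := @Nat.xor_mod_two_pow a b 1; simpa using this

lemma pv_xor_div_two (a b : Nat) : (a ^^^ b) / 2 = a / 2 ^^^ b / 2 := by
  apply Nat.eq_of_testBit_eq; intro i
  simp [Nat.testBit_div_two, Nat.testBit_xor]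

lemma pv_xor_decomp (a b : Nat) : a ^^^ b = 2 * (a / 2 ^^^ b / 2) + (a % 2 ^^^ b % 2) := by
  have h1 := pv_xor_mod_two a b
  have h2 := pv_xor_div_two a b
  omega

lemma pv_shift_cast (n : Nat) : ((n : Int) >>> (1 : Nat)) = ((n / 2 : Nat) : Int) := by
  show (Int.ofNat (n >>> 1)) = _
  simp [Nat.shiftRight_one]

-- the Nat-level loop counts the trailing zeros of n ^^^ n / 2
lemma pv_loopN_eq (n : Nat) (c : Int) (hn : 0 < n) :
    pvLoopN n c = c + ↑(pvTz (n ^^^ n / 2)) := by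
  induction n using Nat.strong_induction_on generalizing c with
  | _ n ih =>
    rw [pvLoopN, if_neg (by omega)]
    by_cases hc : n % 2 = n / 2 % 2
    · -- adjacent bits equal: the loop recurses on n / 2
      rw [if_pos hc]
      have hn2 : 0 < n / 2 := by omega
      rw [ih (n / 2) (by omega) (c + 1) hn2]
      have hw0 : n ^^^ n / 2 ≠ 0 := fun h0 => by
        have := Nat.xor_eq_zero_iff.mp h0; omega
      have hwe : (n ^^^ n / 2) % 2 = 0 := by
        rw [pv_xor_mod_two, hc, Nat.xor_self]
      have hstep : pvTz (n ^^^ n / 2) = pvTz (n / 2 ^^^ n / 2 / 2) + 1 := by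
        rw [pvTz]
        simp [hw0, hwe, pv_xor_div_two]
      rw [hstep]
      push_cast
      ring
    · -- adjacent bits differ: the loop returns count here
      rw [if_neg hc]
      have hwodd : (n ^^^ n / 2) % 2 = 1 := by
        rw [pv_xor_mod_two]
        have h1 := Nat.mod_two_eq_zero_or_one n
        have h2 := Nat.mod_two_eq_zero_or_one (n / 2)
        rcases h1 with h1 | h1 <;> rcases h2 with h2 | h2 <;> simp_all
      have : pvTz (n ^^^ n / 2) = 0 := by
        rw [pvTz]; simp [hwodd]
      simp [this]

-- bridging: the Int loop on a nonnegative input is the Nat loop on its magnitude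
lemma pv_loopA_pos (n : Nat) (c : Int) : findLoopA (↑n) c = pvLoopN n c := by
  induction n using Nat.strong_induction_on generalizing c with
  | _ n ih =>
    rw [findLoopA, pvLoopN]
    by_cases h0 : n = 0
    · subst h0; simp
    · rw [dif_pos ⟨by exact_mod_cast h0, by omega⟩, if_neg h0]
      have hb1 : PySem.Int.band (↑n) 1 = ((n % 2 : Nat) : Int) := by
        rw [PySem.Int.band_one]
        exact_mod_cast PySem.Int.mod_natCast n 2
      have hb2 : PySem.Int.band ((n : Int) >>> (1 : Nat)) 1 = ((n / 2 % 2 : Nat) : Int) := by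
        rw [pv_shift_cast, PySem.Int.band_one]
        exact_mod_cast PySem.Int.mod_natCast (n / 2) 2
      by_cases hc : n % 2 = n / 2 % 2
      · rw [if_neg (by simp [hb1, hb2, hc]), if_pos hc, pv_shift_cast]
        exact ih (n / 2) (by omega) (c + 1)
      · rw [if_pos (by rw [hb1, hb2]; exact fun h => hc (by exact_mod_cast h)), if_neg hc]

-- bridging: the Int loop on a negative input -(m+1) with m ≥ 1 is the Nat loop on m
-- (in two's complement every bit of -(m+1) is the complement of the bit of m, so the
-- adjacent-bits-differ test and the halving agree)
lemma pv_loopA_neg (m : Nat) (c : Int) :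
    findLoopA (Int.negSucc m) c = pvLoopN m c := by
  induction m using Nat.strong_induction_on generalizing c with
  | _ m ih =>
    rw [findLoopA, pvLoopN]
    by_cases h0 : m = 0
    · subst h0; simp
    · rw [dif_pos ⟨by omega, by omega⟩, if_neg h0]
      have he : ((Int.negSucc m) >>> (1 : Nat)) = Int.negSucc (m >>> 1) := rfl
      have he2 : Int.negSucc (m >>> 1) = Int.negSucc (m / 2) := by
        simp [Nat.shiftRight_one]
      have hb1 : PySem.Int.band (Int.negSucc m) 1 = 1 - ((m % 2 : Nat) : Int) := by
        rw [PySem.Int.band_one, PySem.Int.mod_eq_emod_of_pos (by omega)]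
        omega
      have hb2 : PySem.Int.band ((Int.negSucc m) >>> (1 : Nat)) 1 = 1 - ((m / 2 % 2 : Nat) : Int) := by
        rw [he, he2, PySem.Int.band_one, PySem.Int.mod_eq_emod_of_pos (by omega)]
        omega
      by_cases hc : m % 2 = m / 2 % 2
      · rw [if_neg (by rw [hb1, hb2]; simp [hc]), if_pos hc, he, he2]
        have hm2 : 0 < m / 2 := by omega
        exact ih (m / 2) (by omega) (c + 1)
      · rw [if_pos (by rw [hb1, hb2]; intro h; exact hc (by omega)), if_neg hc]

lemma pv_xor_pred (w : Nat) (hw : 0 < w) :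
    w ^^^ (w - 1) = 2 ^ (pvTz w + 1) - 1 := by
  induction w using Nat.strong_induction_on with
  | _ w ih =>
    have hd := pv_xor_decomp w (w - 1)
    by_cases hodd : w % 2 = 1
    · have h1 : (w - 1) / 2 = w / 2 := by omega
      have h2 : (w - 1) % 2 = 0 := by omega
      have ht : pvTz w = 0 := by rw [pvTz]; simp [hodd]
      rw [h1, h2, hodd, Nat.xor_self] at hd
      rw [ht]
      simpa using hd
    · have heven : w % 2 = 0 := by omega
      have hn2 : 0 < w / 2 := by omega
      have h1 : (w - 1) / 2 = w / 2 - 1 := by omega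
      have h2 : (w - 1) % 2 = 1 := by omega
      rw [h1, h2, heven] at hd
      rw [ih (w / 2) (by omega) hn2] at hd
      have ht : pvTz w = pvTz (w / 2) + 1 := by
        rw [pvTz]; simp [heven, Nat.pos_iff_ne_zero.mp hw]
      rw [ht, hd]
      have hp : 0 < 2 ^ (pvTz (w / 2) + 1) := Nat.two_pow_pos _
      rw [pow_succ 2 (pvTz (w / 2) + 1)]
      have hx01 : (0 : Nat) ^^^ 1 = 1 := by decide
      rw [hx01]
      omega

lemma pv_bitLength_pred_pow (t : Nat) :
    PySem.Int.bitLength ((2 ^ (t + 1) - 1 : Nat) : Int) = t + 1 := by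
  induction t with
  | zero => decide
  | succ t ih =>
    have hp : 0 < 2 ^ (t + 1) := Nat.two_pow_pos _
    have hm : 0 < 2 ^ (t + 2) - 1 := by
      have : 0 < 2 ^ (t + 2) := Nat.two_pow_pos _
      have h2 : 2 ^ (t + 2) = 2 ^ (t + 1) * 2 := pow_succ 2 (t + 1)
      omega
    rw [PySem.Int.bitLength_natCast hm]
    have hdiv : (2 ^ (t + 2) - 1) / 2 = 2 ^ (t + 1) - 1 := by
      have h2 : 2 ^ (t + 2) = 2 ^ (t + 1) * 2 := pow_succ 2 (t + 1)
      omega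
    rw [hdiv, ih]

-- B's tail: bit_length of v ^ (v - 1) minus one is the trailing-zero count of v
lemma pv_tail (w : Nat) (hw : 0 < w) :
    (PySem.Int.bitLength (PySem.Int.bxor (↑w) ((w : Int) - 1)) : Int) - 1 = ↑(pvTz w) := by
  have hsub : ((w : Int) - 1) = ((w - 1 : Nat) : Int) := by omega
  rw [hsub, PySem.Int.bxor_natCast, pv_xor_pred w hw, pv_bitLength_pred_pow]
  push_cast
  ring

-- ===== VERDICT (by name: the statement is the Claim_ definition above) =====
theorem find_first_change_spec : Claim_equal_find_first_change := by
  intro x _ hpre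
  unfold Spec_find_first_change find_first_change find_first_change_alt
  cases x with
  | ofNat n =>
    have hn : 0 < n := by
      rcases Nat.eq_zero_or_pos n with h0 | h0
      · exact absurd (by simp [h0]) hpre.1
      · exact h0
    have hv : PySem.Int.bxor (Int.ofNat n) ((Int.ofNat n) >>> (1 : Nat)) = ((n ^^^ n / 2 : Nat) : Int) := by
      show PySem.Int.bxor (↑n) ((n : Int) >>> (1 : Nat)) = _
      rw [pv_shift_cast]; exact PySem.Int.bxor_natCast n (n / 2)
    have hw0 : (n ^^^ n / 2) ≠ 0 := fun h0 => by
      have := Nat.xor_eq_zero_iff.mp h0; omega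
    simp only [hv]
    rw [if_neg (by exact_mod_cast hw0)]
    show findLoopA (↑n) 0 = _
    rw [pv_loopA_pos n 0, pv_loopN_eq n 0 hn, pv_tail _ (Nat.pos_of_ne_zero hw0)]
    ring
  | negSucc m =>
    have hm : 0 < m := by
      rcases Nat.eq_zero_or_pos m with h0 | h0
      · exact absurd (by subst h0; decide) hpre.2
      · exact h0
    have hv : PySem.Int.bxor (Int.negSucc m) ((Int.negSucc m) >>> (1 : Nat)) = ((m ^^^ m / 2 : Nat) : Int) := by
      have he : ((Int.negSucc m) >>> (1 : Nat)) = Int.negSucc (m / 2) := by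
        show Int.negSucc (m >>> 1) = _
        simp [Nat.shiftRight_one]
      rw [he]
      simp [PySem.Int.bxor]
      omega
    have hw0 : (m ^^^ m / 2) ≠ 0 := fun h0 => by
      have := Nat.xor_eq_zero_iff.mp h0; omega
    simp only [hv]
    rw [if_neg (by exact_mod_cast hw0)]
    rw [pv_loopA_neg m 0, pv_loopN_eq m 0 hm, pv_tail _ (Nat.pos_of_ne_zero hw0)]
    ring
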